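-- pv_equiv track=rewrite | github.com/thanhtlx/Context-encoded-change | get_commit_message.py | clean_msg
-- ===== SOURCE A (Python) =====
-- def clean_msg(text):
--     if not isinstance(text, str):
--         return text
--     text = text.strip().splitlines()
--     ll = ['-Url:', '-id:', '-by:', 'Cc:', 'CC:',
--           '-Id:', ' URL:', 'Cr-Commit-Position:', '-Url:',
--           'Author:', 'Reviewers:']
--     while True:
--         tmp = len(text)
--         for st in ll:
--             text = list(filter(lambda line: st not in line, text))
--         if tmp == len(text):
--             break
--     return '\n'.join(text)
-- ===== SOURCE B (Python) =====
-- def _tagged(line, markers):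
--     # every marker ends with ':', so a marker occurs in `line` iff some prefix
--     # of `line` ending at a ':' character ends with that marker
--     return any(c == ':' and any(line.endswith(m, 0, i + 1) for m in markers)
--                for i, c in enumerate(line))
--
--
-- def clean_msg(text):
--     if not isinstance(text, str):
--         return text
--     markers = ['-Url:', '-id:', '-by:', 'Cc:', 'CC:',
--                '-Id:', ' URL:', 'Cr-Commit-Position:', '-Url:',
--                'Author:', 'Reviewers:']
--     lines = text.strip().splitlines()
--     return '\n'.join(line for line in lines if not _tagged(line, markers))
-- ===== Notes on version B (the rewrite author's own statement) =====
-- stated objective: alternative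
-- what changed: Replaced the fixed-point while-loop of eleven sequential substring-filter rebuilds with a colon-anchored matcher: since every marker ends in ':', B scans each line once and at each ':' character tests whether the prefix ending there ends with a marker, never running a generic substring search.
import Mathlib
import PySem

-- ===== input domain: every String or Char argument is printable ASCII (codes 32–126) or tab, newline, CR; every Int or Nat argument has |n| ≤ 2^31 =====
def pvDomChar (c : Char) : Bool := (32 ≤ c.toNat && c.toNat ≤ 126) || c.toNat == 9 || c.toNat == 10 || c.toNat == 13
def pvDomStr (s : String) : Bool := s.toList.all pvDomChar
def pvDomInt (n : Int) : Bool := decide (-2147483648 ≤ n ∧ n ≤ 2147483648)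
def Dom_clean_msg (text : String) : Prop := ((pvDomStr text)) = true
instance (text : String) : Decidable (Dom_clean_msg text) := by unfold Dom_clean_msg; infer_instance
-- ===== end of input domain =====

-- B drops the generic-substring filter passes: since every marker ends in ':', B scans each
-- line once and tests, at each ':' character, whether the prefix ending there ends with a
-- marker (objective: alternative — a different matching mechanism, similar cost).


-- ===== PORT A =====
def clean_msg_ll : List String :=
  ["-Url:", "-id:", "-by:", "Cc:", "CC:",
   "-Id:", " URL:", "Cr-Commit-Position:", "-Url:",
   "Author:", "Reviewers:"]

-- one iteration of the while-body: the eleven sequential filter rebuilds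
def clean_msg_pass (text : List String) : List String :=
  clean_msg_ll.foldl (fun t st => t.filter (fun line => !(PySem.Str.isIn st line))) text

theorem clean_msg_pass_len_le (text : List String) :
    (clean_msg_pass text).length ≤ text.length := by
  unfold clean_msg_pass
  generalize clean_msg_ll = ms
  induction ms generalizing text with
  | nil => simp
  | cons m ms ih =>
      simp only [List.foldl_cons]
      exact le_trans (ih _) (List.length_filter_le _ _)

-- while True: tmp = len(text); eleven filters; break when length unchanged
def clean_msg_loop (text : List String) : List String :=
  if text.length = (clean_msg_pass text).length then clean_msg_pass text
  else clean_msg_loop (clean_msg_pass text)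
termination_by text.length
decreasing_by
  have h := clean_msg_pass_len_le text
  omega

def clean_msg (text : String) : String :=
  PySem.Str.join "\n" (clean_msg_loop (PySem.Str.splitlines (PySem.Str.strip text)))

-- ===== PORT B =====
-- Source B's _tagged: scan (i, c) over the line; at each ':' test whether line[0:i+1]
-- ends with some marker (line.endswith(m, 0, i+1) with 0 ≤ i+1 IS endswith of the slice)
def clean_msg_tagged (line : String) (markers : List String) : Bool :=
  (PySem.List.enumerate line.toList 0).any (fun p =>
    p.2 == ':' && markers.any (fun m =>
      PySem.Chars.endswith (PySem.Chars.slice line.toList (some 0) (some (p.1 + 1))) m.toList))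

def clean_msg_alt (text : String) : String :=
  let markers : List String :=
    ["-Url:", "-id:", "-by:", "Cc:", "CC:",
     "-Id:", " URL:", "Cr-Commit-Position:", "-Url:",
     "Author:", "Reviewers:"]
  let lines := PySem.Str.splitlines (PySem.Str.strip text)
  PySem.Str.join "\n" (lines.filter (fun line => !(clean_msg_tagged line markers)))

-- ===== PRECONDITION & SPEC =====
def Spec_clean_msg (text : String) (out : String) : Prop := out = clean_msg_alt text
instance (text : String) (out : String) : Decidable (Spec_clean_msg text out) := by unfold Spec_clean_msg; infer_instance

-- ===== CLAIM =====
def Claim_equal_clean_msg : Prop := ∀ (text : String), Dom_clean_msg text → Spec_clean_msg text (clean_msg text)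

-- ===== LEMMAS AND PROOFS =====

-- sequential filters over a list of markers = one filter with the conjoined predicate
theorem foldl_filter_eq_filter_all (p : String → String → Bool) (ms : List String)
    (xs : List String) :
    ms.foldl (fun t st => t.filter (p st)) xs
      = xs.filter (fun x => ms.all (fun st => p st x)) := by
  induction ms generalizing xs with
  | nil => simp
  | cons m ms ih =>
      simp only [List.foldl_cons, ih, List.filter_filter, List.all_cons]
      congr 1
      funext x
      exact Bool.and_comm _ _

theorem clean_msg_pass_eq (xs : List String) :
    clean_msg_pass xs
      = xs.filter (fun line => clean_msg_ll.all (fun st => !(PySem.Str.isIn st line))) := by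
  unfold clean_msg_pass
  exact foldl_filter_eq_filter_all _ _ _

-- one pass is already a fixed point, so the loop stops after the second pass
theorem clean_msg_pass_idem (xs : List String) :
    clean_msg_pass (clean_msg_pass xs) = clean_msg_pass xs := by
  simp only [clean_msg_pass_eq, List.filter_filter]
  apply List.filter_congr
  intro x hx
  exact Bool.and_self _

theorem clean_msg_loop_eq (xs : List String) :
    clean_msg_loop xs = clean_msg_pass xs := by
  rw [clean_msg_loop.eq_def]
  by_cases h : xs.length = (clean_msg_pass xs).length
  · simp [h]
  · simp only [h, if_false]
    rw [clean_msg_loop.eq_def]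
    simp [clean_msg_pass_idem]

-- a list whose last element is ':' is an infix of l iff it is a suffix of a
-- prefix of l ending just past a ':' character
theorem infix_iff_colon_anchor (m l : List Char) (hm : m.getLast? = some ':') :
    m <:+: l ↔ ∃ k, ∃ _ : k < l.length, l[k] = ':' ∧ m <:+ l.take (k + 1) := by
  constructor
  · rintro ⟨s, t, h⟩
    have hmne : m ≠ [] := by intro h0; rw [h0] at hm; simp at hm
    have hml : 1 ≤ m.length := List.length_pos_of_ne_nil hmne
    refine ⟨s.length + m.length - 1, ?_, ?_, ?_⟩
    · subst h; simp; omega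
    · have hk1 : s.length + m.length - 1 + 1 = (s ++ m).length := by simp; omega
      have hlast : (s ++ m).getLast? = some ':' := by
        rw [List.getLast?_append_of_ne_nil _ hmne]; exact hm
      have hgl : (s ++ m)[(s ++ m).length - 1]? = some ':' := by
        rw [← List.getLast?_eq_getElem?, hlast]
      have hidx : l[s.length + m.length - 1]? = some ':' := by
        subst h
        rw [List.getElem?_append_left (by simp; omega)]
        simpa [Nat.add_sub_cancel] using hgl
      have hlt : s.length + m.length - 1 < l.length := by subst h; simp; omega
      have := List.getElem?_eq_getElem hlt
      rw [hidx] at this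
      exact (Option.some.injEq _ _).mp this.symm
    · have : l.take (s.length + m.length - 1 + 1) = s ++ m := by
        have : s.length + m.length - 1 + 1 = (s ++ m).length := by simp; omega
        rw [this, ← h]; exact List.take_left
      rw [this]
      exact List.suffix_append s m
  · rintro ⟨k, hk, _, hsuf⟩
    exact hsuf.isInfix.trans (List.take_prefix _ _).isInfix

-- fact about the marker list: every marker's last character is ':'
theorem clean_msg_ll_last : ∀ m ∈ clean_msg_ll, m.toList.getLast? = some ':' := by decide

-- line[0:i+1] with i = 0+k is line.take (k+1)
theorem slice_take_aux (l : List Char) (k : Nat) :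
    PySem.Chars.slice l (some 0) (some ((0 : Int) + k + 1)) = l.take (k + 1) := by
  have h : ((0 : Int) + k + 1) = ((k + 1 : Nat) : Int) := by push_cast; ring
  rw [h, PySem.Chars.slice_eq_listSlice, PySem.List.slice_zero_start,
    PySem.List.slice_to_natCast]

-- B's colon-anchored scan finds exactly the lines some marker occurs in
theorem tagged_eq_any_isIn (line : String) :
    clean_msg_tagged line clean_msg_ll
      = clean_msg_ll.any (fun st => PySem.Str.isIn st line) := by
  unfold clean_msg_tagged
  rw [Bool.eq_iff_iff]
  simp only [List.any_eq_true, PySem.List.mem_enumerate_iff, PySem.Str.isIn_iff_infix,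
    Bool.and_eq_true, beq_iff_eq]
  constructor
  · rintro ⟨p, ⟨k, hk, rfl⟩, hcolon, m, hmem, hend⟩
    refine ⟨m, hmem, ?_⟩
    rw [infix_iff_colon_anchor _ _ (clean_msg_ll_last m hmem)]
    rw [slice_take_aux] at hend
    exact ⟨k, hk, hcolon, (PySem.Chars.endswith_iff _ _).mp hend⟩
  · rintro ⟨m, hmem, hinf⟩
    rw [infix_iff_colon_anchor _ _ (clean_msg_ll_last m hmem)] at hinf
    obtain ⟨k, hk, hcol, hsuf⟩ := hinf
    refine ⟨((0 : Int) + k, line.toList[k]), ⟨k, hk, rfl⟩, hcol, m, hmem, ?_⟩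
    rw [slice_take_aux]
    exact (PySem.Chars.endswith_iff _ _).mpr hsuf

theorem all_not_eq_not_any (ll : List String) (line : String) :
    ll.all (fun st => !(PySem.Str.isIn st line)) = !(ll.any (fun st => PySem.Str.isIn st line)) := by
  induction ll with
  | nil => rfl
  | cons m ms ih => simp only [List.all_cons, List.any_cons, Bool.not_or, ih]

-- ===== VERDICT =====
theorem clean_msg_spec : Claim_equal_clean_msg := by
  intro text _
  unfold Spec_clean_msg clean_msg clean_msg_alt
  rw [clean_msg_loop_eq, clean_msg_pass_eq]
  apply congrArg
  apply List.filter_congr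
  intro line _
  rw [all_not_eq_not_any]
  exact congrArg (!·) (tagged_eq_any_isIn line).symm
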